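-- pv_equiv track=rewrite | github.com/ninepig/leecode_dd_2024 | zmianjing/dd/pureDD2/stringCompareProblem.py | findSimilarNameWithOneChange
-- ===== SOURCE A (Python) =====
-- import collections
--
-- def findSimilarNameWithOneChange(resName:str, candidates:list[str])->list[str]:
--     ## can change at most once , means we can have 2 char different,  and counter should be same
--     res_counter = collections.Counter(resName)
--     res = []
--     for candidate in candidates: # naming conversion is not good
--         counter = 0
--         candidate_counter = collections.Counter(candidate)
--         if candidate_counter != res_counter:
--             continue
--         for i in range(len(resName)):
--             if resName[i] != candidate[i]:
--                 counter += 1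
--             if counter >2 : # 注意事项，提前break 的条件
--                 break
--         if counter ==0 or counter == 2:
--             res.append(candidate)
--
--     return res
-- ===== SOURCE B (Python) =====
-- def _is_one_swap(res: str, cand: str) -> bool:
--     if len(cand) != len(res):
--         return False
--     mis = [i for i in range(len(res)) if res[i] != cand[i]]
--     if not mis:
--         return True
--     if len(mis) != 2:
--         return False
--     i, j = mis
--     return res[i] == cand[j] and res[j] == cand[i]
--
-- def findSimilarNameWithOneChange(resName: str, candidates: list[str]) -> list[str]:
--     return [c for c in candidates if _is_one_swap(resName, c)]
-- ===== Notes on version B (the rewrite author's own statement) =====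
-- stated objective: faster
-- what changed: Replaces A's per-candidate Counter construction and multiset comparison plus a break-counting loop with a direct positional test: equal length, collect mismatch indices, accept iff none or exactly two that are cross-equal (a genuine swap).
import Mathlib
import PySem

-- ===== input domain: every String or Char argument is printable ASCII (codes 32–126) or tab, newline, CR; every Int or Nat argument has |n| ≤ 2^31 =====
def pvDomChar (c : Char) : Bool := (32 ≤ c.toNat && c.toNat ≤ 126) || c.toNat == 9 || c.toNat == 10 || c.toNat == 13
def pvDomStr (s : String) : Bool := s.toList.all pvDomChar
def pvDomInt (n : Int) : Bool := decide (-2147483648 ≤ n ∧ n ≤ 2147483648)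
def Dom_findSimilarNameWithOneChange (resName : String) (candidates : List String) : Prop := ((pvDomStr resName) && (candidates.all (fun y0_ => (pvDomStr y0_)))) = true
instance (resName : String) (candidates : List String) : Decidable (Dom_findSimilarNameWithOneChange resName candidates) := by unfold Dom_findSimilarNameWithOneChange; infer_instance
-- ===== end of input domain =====

-- B replaces A's Counter-multiset comparison + break-counting loop by a direct positional
-- swap test (same length; mismatch indices empty, or exactly two and cross-equal): no per-candidate hash tables, measured faster.


-- ===== PORT A =====
-- Python's '==' on dicts ignores insertion order: equal key sets and equal value at every key.
def pvDictPyEq (d d' : PySem.Dict Char Int) : Bool :=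
  PySem.Set.equal d.keys d'.keys && d.keys.all (fun k => d.getD k 0 == d'.getD k 0)

-- literal port of A: Counter-equality filter, then a mismatch-counting loop with early break.
-- 'candidate[i]' is only evaluated when the counters are equal, so i is in range there and
-- the pyGet? comparison is exact on every reachable state.
def findSimilarNameWithOneChange (resName : String) (candidates : List String) : List String :=
  let rl := resName.toList
  let resCounter := PySem.Dict.counter rl
  candidates.foldl (fun res candidate =>
    let cl := candidate.toList
    let candCounter := PySem.Dict.counter cl
    if pvDictPyEq candCounter resCounter = false then res
    else
      let counter := ((PySem.List.pyRange 0 (PySem.Str.len resName) 1).foldl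
        (fun st i =>
          if st.2 then st      -- already broke out of the loop
          else
            let c1 := if PySem.List.pyGet? rl i ≠ PySem.List.pyGet? cl i then st.1 + 1 else st.1
            (c1, decide (c1 > 2))) ((0 : Nat), false)).1
      if counter = 0 ∨ counter = 2 then res ++ [candidate] else res) []

-- ===== PORT B =====
def pvIsOneSwap (rl cl : List Char) : Bool :=
  if cl.length = rl.length then
    match (List.range rl.length).filter (fun i => !(rl[i]? == cl[i]?)) with
    | [] => true
    | [i, j] => rl[i]? == cl[j]? && rl[j]? == cl[i]?
    | _ => false
  else false

def findSimilarNameWithOneChange_alt (resName : String) (candidates : List String) : List String :=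
  candidates.filter (fun cand => pvIsOneSwap resName.toList cand.toList)

-- ===== PRECONDITION & SPEC =====
def Spec_findSimilarNameWithOneChange (resName : String) (candidates : List String) (out : List String) : Prop := out = findSimilarNameWithOneChange_alt resName candidates
instance (resName : String) (candidates : List String) (out : List String) : Decidable (Spec_findSimilarNameWithOneChange resName candidates out) := by unfold Spec_findSimilarNameWithOneChange; infer_instance

-- ===== CLAIM (what is proved, stated in full; the proofs are below) =====
def Claim_equal_findSimilarNameWithOneChange : Prop := ∀ (resName : String) (candidates : List String), Dom_findSimilarNameWithOneChange resName candidates → Spec_findSimilarNameWithOneChange resName candidates (findSimilarNameWithOneChange resName candidates)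

-- ===== LEMMAS AND PROOFS =====

-- Python dict equality on two counters says exactly "same count for every character".
theorem pvDictPyEq_counter_iff (cl rl : List Char) :
    pvDictPyEq (PySem.Dict.counter cl) (PySem.Dict.counter rl) = true ↔
      ∀ c, cl.count c = rl.count c := by
  unfold pvDictPyEq
  rw [Bool.and_eq_true, PySem.Dict.keys_counter, PySem.Dict.keys_counter,
      PySem.Set.equal_iff, List.all_eq_true]
  constructor
  · rintro ⟨hmem, hval⟩ c
    by_cases hc : c ∈ cl
    · have := hval c (by simpa [PySem.Set.mem_ofList] using hc)
      simp only [PySem.Dict.getD_counter, beq_iff_eq] at this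
      exact_mod_cast this
    · have hc' : c ∉ rl := by
        intro h
        exact hc (by simpa [PySem.Set.mem_ofList] using (hmem c).mpr (by simpa [PySem.Set.mem_ofList] using h))
      simp [List.count_eq_zero.mpr hc, List.count_eq_zero.mpr hc']
  · intro h
    refine ⟨fun c => ?_, fun c _ => ?_⟩
    · simp only [PySem.Set.mem_ofList]
      constructor
      · intro hc
        have hcp := List.count_pos_iff.mpr hc
        have := h c
        exact List.count_pos_iff.mp (by omega)
      · intro hc
        have hcp := List.count_pos_iff.mpr hc
        have := h c
        exact List.count_pos_iff.mp (by omega)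
    · simp [PySem.Dict.getD_counter, h c]

-- the break loop: started from c ≤ 3, the final counter is min (c + #mismatches left) 3
theorem pvBreakFold (rl cl : List Char) (l : List Int) : ∀ (c : Nat), c ≤ 3 →
    ((l.foldl (fun st i =>
        if st.2 then st
        else
          let c1 := if PySem.List.pyGet? rl i ≠ PySem.List.pyGet? cl i then st.1 + 1 else st.1
          (c1, decide (c1 > 2))) ((c, decide (c > 2)) : Nat × Bool)).1 : Nat)
      = min (c + l.countP (fun i => decide (PySem.List.pyGet? rl i ≠ PySem.List.pyGet? cl i))) 3 := by
  induction l with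
  | nil => intro c hc; simp; omega
  | cons x xs ih =>
    intro c hc
    rw [List.foldl_cons]
    by_cases hb : c > 2
    · have h3 : c = 3 := by omega
      subst h3
      rw [if_pos (show ((3 : Nat), decide ((3 : Nat) > 2)).2 = true from rfl)]
      have := ih 3 (by omega)
      rw [show ((3 : Nat), decide ((3 : Nat) > 2)) = (((3 : Nat), true) : Nat × Bool) from rfl] at this ⊢
      rw [this]
      omega
    · rw [if_neg (by simp; omega)]
      by_cases hx : PySem.List.pyGet? rl x ≠ PySem.List.pyGet? cl x
      · rw [if_pos hx]
        have := ih (c + 1) (by omega)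
        simp only at this ⊢
        rw [this]
        simp [hx]
        omega
      · rw [if_neg hx]
        have := ih c (by omega)
        simp only at this ⊢
        rw [this]
        simp [hx]

theorem pvPyRangeNat (n : Nat) : PySem.List.pyRange 0 (n : Int) 1 = (List.range n).map (fun k : Nat => (k : Int)) := by
  induction n with
  | zero => simp [PySem.List.pyRange_one_eq_nil]
  | succ m ih =>
    have htail : PySem.List.pyRange (m : Int) ((m + 1 : Nat) : Int) 1 = [(m : Int)] := by
      rw [PySem.List.pyRange_one_cons (by exact_mod_cast Nat.lt_succ_self m),
          PySem.List.pyRange_one_eq_nil (by push_cast; omega)]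
    rw [PySem.List.pyRange_one_append 0 (m : Int) ((m + 1 : Nat) : Int)
          (Int.natCast_nonneg m) (by exact_mod_cast Nat.le_succ m),
        htail, ih, List.range_succ]
    simp

-- counting a two-position overwrite
theorem pvCountSet2 (rl : List Char) (i j : Nat) (hi : i < rl.length) (hj : j < rl.length)
    (hne : i ≠ j) (a b c : Char) :
    ((rl.set i a).set j b).count c + (if rl[i] = c then 1 else 0) + (if rl[j] = c then 1 else 0)
      = rl.count c + (if a = c then 1 else 0) + (if b = c then 1 else 0) := by
  have hj' : j < (rl.set i a).length := by simpa using hj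
  have h2 := List.count_set (a := b) (b := c) (l := rl.set i a) hj'
  have h1 := List.count_set (a := a) (b := c) (l := rl) hi
  have hgj : (rl.set i a)[j]'hj' = rl[j]'hj := by simp [hne]
  rw [hgj] at h2
  have n1 : (if rl[i]'hi = c then 1 else 0) ≤ rl.count c := by
    split_ifs with h
    · have : c ∈ rl := h ▸ List.getElem_mem hi
      simpa [List.count_pos_iff] using this
    · omega
  have n2 : (if rl[j]'hj = c then 1 else 0) ≤ (rl.set i a).count c := by
    split_ifs with h
    · have : c ∈ rl.set i a := by
        have := List.getElem_mem hj'
        rwa [hgj, h] at this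
      simpa [List.count_pos_iff] using this
    · omega
  simp only [beq_iff_eq] at h1 h2
  split_ifs at h1 h2 n1 n2 ⊢ <;> omega

-- two strings of equal length that disagree exactly at i and j: equal multisets ↔ genuine swap
theorem pvSwapIff (rl cl : List Char) (i j : Nat) (hi : i < rl.length) (hj : j < rl.length)
    (hi' : i < cl.length) (hj' : j < cl.length) (hlen : cl.length = rl.length) (hij : i ≠ j)
    (hmi : rl[i]'hi ≠ cl[i]'hi') (hmj : rl[j]'hj ≠ cl[j]'hj')
    (hoth : ∀ k, (hk : k < rl.length) → (hk' : k < cl.length) → k ≠ i → k ≠ j → rl[k]'hk = cl[k]'hk') :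
    (∀ c, cl.count c = rl.count c) ↔ (cl[i]'hi' = rl[j]'hj ∧ cl[j]'hj' = rl[i]'hi) := by
  have hcl : cl = (rl.set i (cl[i]'hi')).set j (cl[j]'hj') := by
    apply List.ext_getElem
    · simp [hlen]
    · intro k h1 h2
      rw [List.getElem_set, List.getElem_set]
      by_cases e1 : j = k
      · subst e1; simp
      · by_cases e2 : i = k
        · subst e2; simp [e1]
        · simp only [if_neg e1, if_neg e2]
          exact (hoth k (by simpa using h2) h1 (fun h => e2 h.symm) (fun h => e1 h.symm)).symm
  constructor
  · intro hcnt
    have key : ∀ c, (if (cl[i]'hi') = c then 1 else 0) + (if (cl[j]'hj') = c then 1 else 0)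
        = (if (rl[i]'hi) = c then 1 else 0) + (if (rl[j]'hj) = c then 1 else 0) := by
      intro c
      have e := pvCountSet2 rl i j hi hj hij (cl[i]'hi') (cl[j]'hj') c
      rw [← hcl] at e
      have := hcnt c
      omega
    constructor
    · by_cases hq : cl[i]'hi' = rl[j]'hj
      · exact hq
      · exfalso
        have h1 := key (cl[i]'hi')
        rw [if_pos rfl, if_neg (show ¬((rl[i]'hi) = cl[i]'hi') from fun h => hmi h),
            if_neg (show ¬((rl[j]'hj) = cl[i]'hi') from fun h => hq h.symm)] at h1
        split_ifs at h1 <;> omega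
    · by_cases hq : cl[j]'hj' = rl[i]'hi
      · exact hq
      · exfalso
        have h2 := key (cl[j]'hj')
        rw [if_pos rfl, if_neg (show ¬((rl[i]'hi) = cl[j]'hj') from fun h => hq h.symm),
            if_neg (show ¬((rl[j]'hj) = cl[j]'hj') from fun h => hmj h)] at h2
        split_ifs at h2 <;> omega
  · rintro ⟨h1, h2⟩ c
    have e := pvCountSet2 rl i j hi hj hij (cl[i]'hi') (cl[j]'hj') c
    rw [← hcl, h1, h2] at e
    split_ifs at e <;> omega

-- the per-candidate equivalence: A's Counter test + mismatch count ∈ {0,2} ↔ B's swap test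
theorem pvPerCand (rl cl : List Char) :
    (pvDictPyEq (PySem.Dict.counter cl) (PySem.Dict.counter rl) = true ∧
      ((List.range rl.length).countP (fun i => !(rl[i]? == cl[i]?)) = 0 ∨
       (List.range rl.length).countP (fun i => !(rl[i]? == cl[i]?)) = 2))
    ↔ pvIsOneSwap rl cl = true := by
  rw [pvDictPyEq_counter_iff, List.countP_eq_length_filter]
  unfold pvIsOneSwap
  by_cases hlen : cl.length = rl.length
  · rw [if_pos hlen]
    have hmemf : ∀ k, k ∈ (List.range rl.length).filter (fun i => !(rl[i]? == cl[i]?)) ↔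
        (k < rl.length ∧ rl[k]? ≠ cl[k]?) := by
      intro k; simp [List.mem_filter, List.mem_range]
    cases hm : (List.range rl.length).filter (fun i => !(rl[i]? == cl[i]?)) with
    | nil =>
      have hcl : cl = rl := by
        apply List.ext_getElem?
        intro k
        by_cases hk : k < rl.length
        · have hnot : ¬(k < rl.length ∧ rl[k]? ≠ cl[k]?) := by
            rw [← hmemf k, hm]; simp
          push_neg at hnot
          exact (hnot hk).symm
        · rw [List.getElem?_eq_none (by omega : rl.length ≤ k),
              List.getElem?_eq_none (by omega : cl.length ≤ k)]
      simp [hcl]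
    | cons i t =>
      cases t with
      | nil => simp
      | cons j t2 =>
        cases t2 with
        | cons k t3 =>
          simp only [List.length_cons]
          simp only [Bool.false_eq_true, iff_false, not_and]
          intro _
          omega
        | nil =>
          obtain ⟨hi, hmi'⟩ := (hmemf i).mp (by rw [hm]; simp)
          obtain ⟨hj, hmj'⟩ := (hmemf j).mp (by rw [hm]; simp)
          have hij : i < j := by
            have hp := (List.pairwise_lt_range (n := rl.length)).filter
              (fun i => !(rl[i]? == cl[i]?))
            rw [hm] at hp
            exact (List.pairwise_cons.mp hp).1 j (by simp)
          have hi' : i < cl.length := by rw [hlen]; exact hi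
          have hj' : j < cl.length := by rw [hlen]; exact hj
          have hmi : rl[i]'hi ≠ cl[i]'hi' := by
            intro h; apply hmi'
            rw [List.getElem?_eq_getElem hi, List.getElem?_eq_getElem hi', h]
          have hmj : rl[j]'hj ≠ cl[j]'hj' := by
            intro h; apply hmj'
            rw [List.getElem?_eq_getElem hj, List.getElem?_eq_getElem hj', h]
          have hoth : ∀ k, (hk : k < rl.length) → (hk' : k < cl.length) →
              k ≠ i → k ≠ j → rl[k]'hk = cl[k]'hk' := by
            intro k hk hk' hne1 hne2
            by_contra hne
            have hmem : k ∈ (List.range rl.length).filter (fun i => !(rl[i]? == cl[i]?)) := by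
              rw [hmemf k]
              refine ⟨hk, ?_⟩
              rw [List.getElem?_eq_getElem hk, List.getElem?_eq_getElem hk']
              simpa using hne
            rw [hm] at hmem
            simp at hmem
            tauto
          rw [pvSwapIff rl cl i j hi hj hi' hj' hlen (by omega) hmi hmj hoth]
          rw [show (match [i, j] with
                | [] => true
                | [i, j] => rl[i]? == cl[j]? && rl[j]? == cl[i]?
                | _ => false) = (rl[i]? == cl[j]? && rl[j]? == cl[i]?) from rfl]
          rw [List.getElem?_eq_getElem hi, List.getElem?_eq_getElem hj,
              List.getElem?_eq_getElem hi', List.getElem?_eq_getElem hj']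
          simp only [List.length_cons, List.length_nil, Bool.and_eq_true, beq_iff_eq,
            Option.some.injEq]
          constructor
          · rintro ⟨⟨ha, hb⟩, _⟩
            exact ⟨hb.symm, ha.symm⟩
          · rintro ⟨ha, hb⟩
            exact ⟨⟨hb.symm, ha.symm⟩, by simp⟩
  · rw [if_neg hlen]
    simp only [Bool.false_eq_true, iff_false, not_and]
    intro hcnt _
    exact hlen ((List.perm_iff_count.mpr hcnt).length_eq)

-- the inner loop's value: min(#mismatches, 3)
theorem pvCounterVal (resName : String) (cl : List Char) :
    ((PySem.List.pyRange 0 (PySem.Str.len resName) 1).foldl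
        (fun st i =>
          if st.2 then st
          else
            let c1 := if PySem.List.pyGet? resName.toList i ≠ PySem.List.pyGet? cl i then st.1 + 1 else st.1
            (c1, decide (c1 > 2))) ((0 : Nat), false)).1
      = min ((List.range resName.toList.length).countP (fun k => !(resName.toList[k]? == cl[k]?))) 3 := by
  rw [PySem.Str.len_eq, pvPyRangeNat]
  have h := pvBreakFold resName.toList cl
    ((List.range resName.toList.length).map (fun k : Nat => (k : Int))) 0 (by omega)
  rw [show ((0 : Nat), decide ((0 : Nat) > 2)) = (((0 : Nat), false) : Nat × Bool) from rfl] at h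
  rw [h, List.countP_map]
  have hp : ((fun i => decide (PySem.List.pyGet? resName.toList i ≠ PySem.List.pyGet? cl i)) ∘
      (fun k : Nat => (k : Int))) = fun k : Nat => !(resName.toList[k]? == cl[k]?) := by
    funext k
    simp only [Function.comp, PySem.List.pyGet?_natCast]
    cases hb : resName.toList[k]? == cl[k]? <;> simp_all
  rw [hp, Nat.zero_add]

theorem pvFoldToFilter {f : List String → String → List String} {p : String → Bool}
    (hstep : ∀ res cand, f res cand = if p cand then res ++ [cand] else res) :
    ∀ (l acc : List String), l.foldl f acc = acc ++ l.filter p := by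
  intro l
  induction l with
  | nil => intro acc; simp
  | cons x xs ih =>
    intro acc
    rw [List.foldl_cons, hstep, List.filter_cons]
    by_cases hx : p x = true
    · rw [if_pos hx, if_pos hx, ih]
      simp
    · rw [if_neg hx, if_neg (by simpa using hx), ih]

theorem pvFoldToFilterNil {f : List String → String → List String} {p : String → Bool}
    (hstep : ∀ res cand, f res cand = if p cand then res ++ [cand] else res)
    (l : List String) : l.foldl f [] = l.filter p := by
  rw [pvFoldToFilter hstep l []]
  exact List.nil_append _

-- ===== VERDICT (by name: the statement is the Claim_ definition above) =====
theorem findSimilarNameWithOneChange_spec : Claim_equal_findSimilarNameWithOneChange := by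
  intro resName candidates _
  simp only [Spec_findSimilarNameWithOneChange, findSimilarNameWithOneChange,
    findSimilarNameWithOneChange_alt]
  apply pvFoldToFilterNil
  intro res cand
  rw [pvCounterVal resName cand.toList]
  by_cases hsw : pvIsOneSwap resName.toList cand.toList = true
  · obtain ⟨hdq, hm⟩ := (pvPerCand resName.toList cand.toList).mpr hsw
    rw [if_pos hsw, if_neg (by simp [hdq]),
        if_pos (by rcases hm with h | h <;> rw [h] <;> norm_num)]
  · rw [if_neg hsw]
    by_cases hdq : pvDictPyEq (PySem.Dict.counter cand.toList) (PySem.Dict.counter resName.toList) = false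
    · rw [if_pos hdq]
    · have hdq' : pvDictPyEq (PySem.Dict.counter cand.toList) (PySem.Dict.counter resName.toList) = true := by
        simpa using hdq
      have hm : ¬((List.range resName.toList.length).countP
          (fun i => !(resName.toList[i]? == cand.toList[i]?)) = 0 ∨
          (List.range resName.toList.length).countP
          (fun i => !(resName.toList[i]? == cand.toList[i]?)) = 2) :=
        fun h => hsw ((pvPerCand resName.toList cand.toList).mp ⟨hdq', h⟩)
      rw [if_neg hdq, if_neg (by intro h; exact hm (by omega))]
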